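-- pv_equiv track=rewrite | github.com/ashooha0/Alsecond | utils/eval_matching_util.py | offset_n_triples
-- ===== SOURCE A (Python) =====
-- def offset_n_triples(triples, n_offset):  # TODO: 指定偏移的位数 n(无边界，即尾部的会回到头部)， 若 n % len 则返回None意为跳过
--     len_triple = len(triples)
--     if n_offset % len_triple == 0:
--         return None
--     opinion_spans = [trip[1] for trip in triples]
--     for idx in range(0, len_triple):
--         triples[idx][1] = opinion_spans[(idx+n_offset) % len_triple]
--     return triples
-- ===== SOURCE B (Python) =====
-- def offset_n_triples(triples, n_offset):
--     n = len(triples)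
--     if n_offset % n == 0:
--         return None
--     k = n_offset % n
--
--     def rev(lo, hi):
--         while lo < hi:
--             triples[lo][1], triples[hi][1] = triples[hi][1], triples[lo][1]
--             lo += 1
--             hi -= 1
--
--     rev(0, k - 1)
--     rev(k, n - 1)
--     rev(0, n - 1)
--     return triples
-- ===== Notes on version B (the rewrite author's own statement) =====
-- stated objective: alternative
-- what changed: B rotates the span fields in place with the classic three-reversal rotation (swap endpoints inward over [0,k-1], [k,n-1], [0,n-1]) instead of copying all spans into an auxiliary list and re-indexing it with (i+n_offset) % n, so the O(n) auxiliary list disappears.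
import Mathlib
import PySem

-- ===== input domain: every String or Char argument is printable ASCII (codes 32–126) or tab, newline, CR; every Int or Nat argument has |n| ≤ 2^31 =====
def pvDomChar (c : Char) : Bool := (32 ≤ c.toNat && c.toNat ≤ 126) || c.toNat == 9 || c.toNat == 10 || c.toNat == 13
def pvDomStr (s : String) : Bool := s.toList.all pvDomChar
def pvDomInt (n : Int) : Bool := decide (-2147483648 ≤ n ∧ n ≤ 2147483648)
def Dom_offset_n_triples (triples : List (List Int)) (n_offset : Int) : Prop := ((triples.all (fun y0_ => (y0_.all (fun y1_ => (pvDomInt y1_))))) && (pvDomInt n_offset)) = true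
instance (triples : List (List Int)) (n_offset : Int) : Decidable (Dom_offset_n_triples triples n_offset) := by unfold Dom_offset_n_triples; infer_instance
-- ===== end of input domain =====

-- B rotates the span fields in place by the three-reversal rotation instead of copying spans
-- into an auxiliary list and re-indexing it; same O(n) time, no auxiliary list (objective: alternative).


-- ===== PORT A =====
-- literal port of A: precompute opinion_spans = [trip[1] for trip in triples], then
-- triples[idx][1] = opinion_spans[(idx+n_offset) % len] for idx in range(0, len).
-- Python raises ZeroDivisionError on [] and IndexError on inner lists shorter than 2;
-- those inputs are excluded by Pre_ and the port returns none there.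
def offset_n_triples (triples : List (List Int)) (n_offset : Int) : Option (List (List Int)) :=
  let len_triple : Int := triples.length
  if len_triple = 0 then none
  else if PySem.Int.mod n_offset len_triple = 0 then none
  else
    match triples.mapM (fun trip => PySem.List.pyGet? trip 1) with
    | none => none
    | some opinion_spans =>
        some ((PySem.List.pyRange 0 len_triple 1).foldl
          (fun st idx =>
            PySem.List.pySetD st idx
              (PySem.List.pySetD (PySem.List.pyGetD st idx []) 1
                (PySem.List.pyGetD opinion_spans (PySem.Int.mod (idx + n_offset) len_triple) 0)))
          triples)

-- ===== PORT B =====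
-- Source B's rev(lo, hi): swap the [1]-fields of triples[lo] and triples[hi], moving inward.
def pvRevField1 (st : List (List Int)) (lo hi : Nat) : List (List Int) :=
  if lo < hi then
    pvRevField1
      ((st.set lo ((st.getD lo []).set 1 ((st.getD hi []).getD 1 0))).set hi
        ((st.getD hi []).set 1 ((st.getD lo []).getD 1 0)))
      (lo + 1) (hi - 1)
  else st
termination_by hi - lo

def offset_n_triples_alt (triples : List (List Int)) (n_offset : Int) : Option (List (List Int)) :=
  let n : Int := triples.length
  if n = 0 then none
  else if PySem.Int.mod n_offset n = 0 then none
  else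
    let k : Nat := (PySem.Int.mod n_offset n).toNat
    let t1 := pvRevField1 triples 0 (k - 1)
    let t2 := pvRevField1 t1 k (triples.length - 1)
    some (pvRevField1 t2 0 (triples.length - 1))

-- ===== PRECONDITION & SPEC =====
-- Pre_ excludes exactly the inputs where Python A raises: the empty list (ZeroDivisionError),
-- and inner lists shorter than 2 when the rotation is actually performed (IndexError).
def Pre_offset_n_triples (triples : List (List Int)) (n_offset : Int) : Prop :=
  triples ≠ [] ∧
    (PySem.Int.mod n_offset (triples.length : Int) = 0 ∨ ∀ t ∈ triples, 2 ≤ t.length)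
instance (triples : List (List Int)) (n_offset : Int) : Decidable (Pre_offset_n_triples triples n_offset) := by
  unfold Pre_offset_n_triples; infer_instance

def pvWitness_offset_n_triples : List (List Int) × Int := ([[1, 2], [3, 4], [5, 6]], 1)

def Spec_offset_n_triples (triples : List (List Int)) (n_offset : Int) (out : Option (List (List Int))) : Prop := out = offset_n_triples_alt triples n_offset
instance (triples : List (List Int)) (n_offset : Int) (out : Option (List (List Int))) : Decidable (Spec_offset_n_triples triples n_offset out) := by unfold Spec_offset_n_triples; infer_instance

-- ===== CLAIM (what is proved, stated in full; the proofs are below) =====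
def Claim_equal_offset_n_triples : Prop := ∀ (triples : List (List Int)) (n_offset : Int), Dom_offset_n_triples triples n_offset → Pre_offset_n_triples triples n_offset → Spec_offset_n_triples triples n_offset (offset_n_triples triples n_offset)

-- ===== LEMMAS AND PROOFS =====

-- total-index access through List.set
theorem pvGetD_set (st : List (List Int)) (i p : Nat) (x : List Int) :
    (st.set i x).getD p [] = if p = i ∧ i < st.length then x else st.getD p [] := by
  simp only [List.getD, List.getElem?_set]
  split_ifs <;> simp_all

theorem pvSet1_self (l : List Int) (h : 2 ≤ l.length) : l.set 1 (l.getD 1 0) = l := by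
  match l, h with
  | a :: b :: rest, _ => simp [List.getD]

theorem pvGetD1_set1 (l : List Int) (x : Int) (h : 2 ≤ l.length) :
    (l.set 1 x).getD 1 0 = x := by
  match l, h with
  | a :: b :: rest, _ => simp [List.getD]

theorem pvRev_length (st : List (List Int)) (lo hi : Nat) :
    (pvRevField1 st lo hi).length = st.length := by
  fun_induction pvRevField1 st lo hi with
  | case1 st lo hi h ih => simpa using ih
  | case2 => rfl

theorem pvRev_getD (st : List (List Int)) (lo hi : Nat) (hhi : hi < st.length)
    (hg : ∀ q, q < st.length → 2 ≤ (st.getD q []).length) (p : Nat) :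
    (pvRevField1 st lo hi).getD p [] =
      if lo ≤ p ∧ p ≤ hi then (st.getD p []).set 1 ((st.getD (lo + hi - p) []).getD 1 0)
      else st.getD p [] := by
  by_cases h : lo < hi
  · have hlo : lo < st.length := by omega
    have hlen : ((st.set lo ((st.getD lo []).set 1 ((st.getD hi []).getD 1 0))).set hi
        ((st.getD hi []).set 1 ((st.getD lo []).getD 1 0))).length = st.length := by simp
    have h1 : ∀ q, ((st.set lo ((st.getD lo []).set 1 ((st.getD hi []).getD 1 0))).set hi
        ((st.getD hi []).set 1 ((st.getD lo []).getD 1 0))).getD q [] =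
        if q = hi then (st.getD hi []).set 1 ((st.getD lo []).getD 1 0)
        else if q = lo then (st.getD lo []).set 1 ((st.getD hi []).getD 1 0)
        else st.getD q [] := by
      intro q
      rw [pvGetD_set, pvGetD_set]
      simp only [List.length_set]
      split_ifs <;> (try rfl) <;> omega
    have hG : ∀ q, q < ((st.set lo ((st.getD lo []).set 1 ((st.getD hi []).getD 1 0))).set hi
        ((st.getD hi []).set 1 ((st.getD lo []).getD 1 0))).length →
        2 ≤ (((st.set lo ((st.getD lo []).set 1 ((st.getD hi []).getD 1 0))).set hi
        ((st.getD hi []).set 1 ((st.getD lo []).getD 1 0))).getD q []).length := by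
      intro q hq
      rw [h1]
      split_ifs
      · simpa using hg hi hhi
      · simpa using hg lo hlo
      · exact hg q (hlen ▸ hq)
    have step : pvRevField1 st lo hi = pvRevField1
        ((st.set lo ((st.getD lo []).set 1 ((st.getD hi []).getD 1 0))).set hi
          ((st.getD hi []).set 1 ((st.getD lo []).getD 1 0))) (lo + 1) (hi - 1) := by
      conv_lhs => rw [pvRevField1]
      simp [h]
    rw [step, pvRev_getD _ (lo + 1) (hi - 1) (by rw [hlen]; omega) hG p]
    by_cases hc : lo + 1 ≤ p ∧ p ≤ hi - 1
    · rw [if_pos hc, if_pos (show lo ≤ p ∧ p ≤ hi by omega)]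
      rw [h1 p, h1 (lo + 1 + (hi - 1) - p)]
      rw [if_neg (show p ≠ hi by omega), if_neg (show p ≠ lo by omega)]
      rw [if_neg (show lo + 1 + (hi - 1) - p ≠ hi by omega),
          if_neg (show lo + 1 + (hi - 1) - p ≠ lo by omega),
          show lo + 1 + (hi - 1) - p = lo + hi - p by omega]
    · rw [if_neg hc, h1 p]
      by_cases hp1 : p = hi
      · subst hp1
        rw [if_pos rfl, if_pos (show lo ≤ p ∧ p ≤ p by omega),
            show lo + p - p = lo by omega]
      · rw [if_neg hp1]
        by_cases hp2 : p = lo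
        · subst hp2
          rw [if_pos rfl, if_pos (show p ≤ p ∧ p ≤ hi by omega),
              show p + hi - p = hi by omega]
        · rw [if_neg hp2, if_neg (show ¬(lo ≤ p ∧ p ≤ hi) by omega)]
  · have step : pvRevField1 st lo hi = st := by
      conv_lhs => rw [pvRevField1]
      simp [h]
    rw [step]
    split_ifs with hc
    · obtain ⟨h1, h2⟩ := hc
      have hpl : p = lo := by omega
      have hph : p = hi := by omega
      subst hpl
      rw [show p + hi - p = hi by omega, ← hph, pvSet1_self _ (hg p (by omega))]
    · rfl
termination_by hi - lo
decreasing_by omega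

theorem pvRev_good (st : List (List Int)) (lo hi : Nat) (hhi : hi < st.length)
    (hg : ∀ q, q < st.length → 2 ≤ (st.getD q []).length) :
    ∀ q, q < st.length → 2 ≤ ((pvRevField1 st lo hi).getD q []).length := by
  intro q hq
  rw [pvRev_getD st lo hi hhi hg q]
  split_ifs
  · simpa using hg q hq
  · exact hg q hq

-- the list of spans read by A's comprehension
theorem pvSpans_eq (triples : List (List Int)) (hg : ∀ t ∈ triples, 2 ≤ t.length) :
    triples.mapM (fun trip => PySem.List.pyGet? trip 1) =
      some (triples.map (fun t => t.getD 1 0)) := by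
  induction triples with
  | nil => rfl
  | cons t ts ih =>
    have h2 : 2 ≤ t.length := hg t (by simp)
    have hget : PySem.List.pyGet? t (1 : Int) = some (t.getD 1 0) := by
      rw [PySem.List.pyGet?_of_nonneg _ (by omega)]
      match t, h2 with
      | a :: b :: rest, _ => simp [List.getD]
    rw [List.mapM_cons, hget, ih (fun x hx => hg x (by simp [hx]))]
    rfl

-- characterisation of A's assignment loop, folded over range(0, m)
theorem pvAFold (triples : List (List Int)) (n_offset : Int) (spans : List Int)
    (m : Nat) (hm : m ≤ triples.length) :
    (((PySem.List.pyRange 0 (m : Int) 1).foldl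
        (fun st idx =>
          PySem.List.pySetD st idx
            (PySem.List.pySetD (PySem.List.pyGetD st idx []) 1
              (PySem.List.pyGetD spans
                (PySem.Int.mod (idx + n_offset) (triples.length : Int)) 0)))
        triples).length = triples.length) ∧
    (∀ p : Nat, ((PySem.List.pyRange 0 (m : Int) 1).foldl
        (fun st idx =>
          PySem.List.pySetD st idx
            (PySem.List.pySetD (PySem.List.pyGetD st idx []) 1
              (PySem.List.pyGetD spans
                (PySem.Int.mod (idx + n_offset) (triples.length : Int)) 0)))
        triples).getD p [] =
      if p < m then
        (triples.getD p []).set 1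
          (PySem.List.pyGetD spans
            (PySem.Int.mod ((p : Int) + n_offset) (triples.length : Int)) 0)
      else triples.getD p []) := by
  induction m with
  | zero =>
    constructor
    · simp
    · intro p; simp
  | succ m ih =>
    obtain ⟨ihlen, ihget⟩ := ih (by omega)
    have hsplit : PySem.List.pyRange 0 ((m : Int) + 1) 1 =
        PySem.List.pyRange 0 (m : Int) 1 ++ [(m : Int)] := by
      exact PySem.List.pyRange_one_succ_right (by positivity)
    constructor
    · rw [show ((m + 1 : Nat) : Int) = (m : Int) + 1 by push_cast; ring, hsplit,
          List.foldl_append]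
      simp only [List.foldl_cons, List.foldl_nil]
      rw [PySem.List.pySetD_of_nonneg _ _ (by positivity)]
      simp [ihlen]
    · intro p
      rw [show ((m + 1 : Nat) : Int) = (m : Int) + 1 by push_cast; ring, hsplit,
          List.foldl_append]
      simp only [List.foldl_cons, List.foldl_nil]
      rw [PySem.List.pySetD_of_nonneg _ _ (by positivity)]
      simp only [Int.toNat_natCast]
      rw [pvGetD_set, ihlen]
      have hgm : PySem.List.pyGetD (((PySem.List.pyRange 0 (m : Int) 1).foldl
          (fun st idx =>
            PySem.List.pySetD st idx
              (PySem.List.pySetD (PySem.List.pyGetD st idx []) 1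
                (PySem.List.pyGetD spans
                  (PySem.Int.mod (idx + n_offset) (triples.length : Int)) 0)))
          triples)) (m : Int) [] = triples.getD m [] := by
        rw [PySem.List.pyGetD_natCast, ihget m, if_neg (by omega)]
      rw [hgm]
      by_cases hp : p = m
      · subst hp
        rw [if_pos ⟨rfl, by omega⟩, if_pos (by omega)]
        rw [PySem.List.pySetD_of_nonneg _ _ (by norm_num)]
        norm_num
      · rw [if_neg (by simp [hp]), ihget p]
        by_cases hlt : p < m
        · rw [if_pos hlt, if_pos (by omega)]
        · rw [if_neg hlt, if_neg (by omega)]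

theorem offset_n_triples_main (triples : List (List Int)) (n_offset : Int)
    (hpre : Pre_offset_n_triples triples n_offset) :
    offset_n_triples triples n_offset = offset_n_triples_alt triples n_offset := by
  obtain ⟨hne, hpre2⟩ := hpre
  have hnpos : 0 < triples.length := List.length_pos_of_ne_nil hne
  have hn0 : (triples.length : Int) ≠ 0 := by positivity
  by_cases hm : PySem.Int.mod n_offset (triples.length : Int) = 0
  · unfold offset_n_triples offset_n_triples_alt
    simp [hm]
  · have hg : ∀ t ∈ triples, 2 ≤ t.length := hpre2.resolve_left hm
    have hgi : ∀ q, q < triples.length → 2 ≤ (triples.getD q []).length := by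
      intro q hq
      rw [List.getD_eq_getElem _ _ hq]
      exact hg _ (List.getElem_mem hq)
    set n := triples.length with hn
    set kI := PySem.Int.mod n_offset (n : Int) with hkI
    have hk0 : 0 ≤ kI := PySem.Int.mod_nonneg _ (by exact_mod_cast hnpos)
    have hklt : kI < (n : Int) := PySem.Int.mod_lt _ (by exact_mod_cast hnpos)
    set k := kI.toNat with hkdef
    have hkpos : 0 < k := by omega
    have hkn : k < n := by omega
    set spans := triples.map (fun t => t.getD 1 0) with hspans
    obtain ⟨halen, haget⟩ := pvAFold triples n_offset spans n le_rfl
    -- value of A's span list at a (natural) index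
    have hspan_val : ∀ j : Nat, j < n → PySem.List.pyGetD spans (j : Int) 0 =
        (triples.getD j []).getD 1 0 := by
      intro j hj
      rw [PySem.List.pyGetD_natCast,
          List.getD_eq_getElem _ _ (by simp [hspans, ← hn]; omega),
          List.getD_eq_getElem _ _ (show j < triples.length by omega)]
      simp [hspans]
    -- B's three reversal stages
    set t1 := pvRevField1 triples 0 (k - 1) with ht1
    have hlen1 : t1.length = n := by rw [ht1, pvRev_length, hn]
    have hg1 : ∀ q, q < t1.length → 2 ≤ (t1.getD q []).length := by
      rw [hlen1]; exact pvRev_good triples 0 (k - 1) (by omega) hgi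
    have t1get : ∀ p, t1.getD p [] =
        if p ≤ k - 1 then (triples.getD p []).set 1 ((triples.getD (k - 1 - p) []).getD 1 0)
        else triples.getD p [] := by
      intro p
      rw [ht1, pvRev_getD triples 0 (k - 1) (by omega) hgi p]
      by_cases hc : p ≤ k - 1
      · rw [if_pos ⟨Nat.zero_le _, hc⟩, if_pos hc, show 0 + (k - 1) - p = k - 1 - p by omega]
      · rw [if_neg (by omega), if_neg hc]
    set t2 := pvRevField1 t1 k (n - 1) with ht2
    have hlen2 : t2.length = n := by rw [ht2, pvRev_length, hlen1]
    have hg2 : ∀ q, q < t2.length → 2 ≤ (t2.getD q []).length := by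
      rw [hlen2, ← hlen1]
      exact pvRev_good t1 k (n - 1) (by omega) hg1
    have t2get : ∀ q, q < n → t2.getD q [] = (triples.getD q []).set 1
        ((triples.getD (if q < k then k - 1 - q else k + (n - 1) - q) []).getD 1 0) := by
      intro q hq
      rw [ht2, pvRev_getD t1 k (n - 1) (by omega) hg1 q]
      by_cases hc : k ≤ q
      · rw [if_pos ⟨hc, by omega⟩, t1get q, if_neg (by omega),
            t1get (k + (n - 1) - q), if_neg (by omega), if_neg (by omega)]
      · rw [if_neg (by omega), t1get q, if_pos (by omega), if_pos (by omega)]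
    set t3 := pvRevField1 t2 0 (n - 1) with ht3
    have hlen3 : t3.length = n := by rw [ht3, pvRev_length, hlen2]
    have t3get : ∀ p, p < n → t3.getD p [] = (triples.getD p []).set 1
        ((triples.getD (if n - 1 - p < k then k - 1 - (n - 1 - p)
          else k + (n - 1) - (n - 1 - p)) []).getD 1 0) := by
      intro p hp
      rw [ht3, pvRev_getD t2 0 (n - 1) (by omega) hg2 p,
          if_pos ⟨Nat.zero_le _, by omega⟩, show 0 + (n - 1) - p = n - 1 - p by omega,
          t2get p hp, t2get (n - 1 - p) (by omega), List.set_set,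
          pvGetD1_set1 _ _ (hgi (n - 1 - p) (by omega))]
    -- the rotation index read by A equals the one produced by B's three reversals
    have hidx : ∀ p : Nat, p < n →
        (PySem.Int.mod ((p : Int) + n_offset) (n : Int)).toNat =
          (if n - 1 - p < k then k - 1 - (n - 1 - p) else k + (n - 1) - (n - 1 - p)) := by
      intro p hp
      have hfd := PySem.Int.floordiv_mul_add_mod n_offset (n : Int)
      have hrw : PySem.Int.mod ((p : Int) + n_offset) (n : Int) = ((p : Int) + kI) % (n : Int) := by
        rw [PySem.Int.mod_eq_emod_of_pos (by exact_mod_cast hnpos),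
            show (p : Int) + n_offset =
              ((p : Int) + kI) + (n : Int) * PySem.Int.floordiv n_offset (n : Int) by
              rw [← hkI] at hfd; linarith,
            Int.add_mul_emod_self_left]
      rw [hrw]
      by_cases hcase : (p : Int) + kI < (n : Int)
      · rw [Int.emod_eq_of_lt (by omega) hcase]
        split_ifs <;> omega
      · rw [show ((p : Int) + kI) % (n : Int) = ((p : Int) + kI - (n : Int)) % (n : Int) by
              rw [show (p : Int) + kI - (n : Int) = ((p : Int) + kI) + (n : Int) * (-1) by ring,
                  Int.add_mul_emod_self_left],
            Int.emod_eq_of_lt (by omega) (by omega)]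
        split_ifs <;> omega
    -- both sides return `some` of pointwise-equal lists
    have hmain : ((PySem.List.pyRange 0 (n : Int) 1).foldl
        (fun st idx => PySem.List.pySetD st idx
          (PySem.List.pySetD (PySem.List.pyGetD st idx []) 1
            (PySem.List.pyGetD spans (PySem.Int.mod (idx + n_offset) (n : Int)) 0)))
        triples) = t3 := by
      apply List.ext_getElem (by rw [halen, hlen3])
      intro p hp1 hp2
      rw [← List.getD_eq_getElem _ ([] : List Int) hp1, ← List.getD_eq_getElem _ ([] : List Int) hp2]
      have hp : p < n := by rw [← hlen3]; exact hp2
      rw [haget p, if_pos hp, t3get p hp]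
      have hjnn : (PySem.Int.mod ((p : Int) + n_offset) (n : Int)) =
          (((PySem.Int.mod ((p : Int) + n_offset) (n : Int)).toNat : Nat) : Int) := by
        have := PySem.Int.mod_nonneg ((p : Int) + n_offset) (show (0:Int) < (n:Int) by exact_mod_cast hnpos)
        omega
      rw [hjnn, hspan_val _ (by
            have := PySem.Int.mod_lt ((p : Int) + n_offset) (show (0:Int) < (n:Int) by exact_mod_cast hnpos)
            omega),
          hidx p hp]
    unfold offset_n_triples offset_n_triples_alt
    simp only [← hn, ← hkI]
    rw [if_neg hn0, if_neg hn0, if_neg hm, if_neg hm, pvSpans_eq triples hg, ← hspans, ← hkdef]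
    simp only [← ht1, ← ht2, ← ht3, hmain]

-- ===== VERDICT (by name: the statement is the Claim_ definition above) =====
theorem offset_n_triples_spec : Claim_equal_offset_n_triples := by
  intro triples n_offset _ hpre
  exact offset_n_triples_main triples n_offset hpre
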